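-- pv_equiv track=rewrite | github.com/codedestructed007/Leetcode_Problem_solutions | longest_substring_consecutive_vowels.py | LongestSubstringVowels
-- ===== SOURCE A (Python) =====
-- def LongestSubstringVowels(s:str):
--     prev = 0
--     forward = 0
--     longest_substring_length= 0
--     vowels = 'aeiou'
--
--     while forward< len(s):
--         if s[prev] in vowels and s[forward] not in vowels:
--             if forward - prev > longest_substring_length:
--                 longest_substring_length = forward-prev
--             prev = forward
--             forward+=1
--
--         elif s[prev] in vowels and s[forward] in vowels:
--             forward+=1
--
--         else:
--             prev +=1
--             forward +=1
--
--     # for the last case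
--     if (forward - prev) > longest_substring_length:
--         longest_substring_length = forward - prev
--
--
--     return longest_substring_length
-- ===== SOURCE B (Python) =====
-- def LongestSubstringVowels(s: str):
--     longest = 0
--     current = 0
--     for ch in s:
--         if ch in 'aeiou':
--             current += 1
--             if current > longest:
--                 longest = current
--         else:
--             current = 0
--     return longest
-- ===== Notes on version B (the rewrite author's own statement) =====
-- stated objective: simpler
-- what changed: Replaces A's two-pointer window (prev/forward) with post-loop fixup by a single forward pass keeping a run counter that resets at non-vowels and a running maximum; one character visit and one membership test per step instead of A's two indexings and two membership tests.
import Mathlib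
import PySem

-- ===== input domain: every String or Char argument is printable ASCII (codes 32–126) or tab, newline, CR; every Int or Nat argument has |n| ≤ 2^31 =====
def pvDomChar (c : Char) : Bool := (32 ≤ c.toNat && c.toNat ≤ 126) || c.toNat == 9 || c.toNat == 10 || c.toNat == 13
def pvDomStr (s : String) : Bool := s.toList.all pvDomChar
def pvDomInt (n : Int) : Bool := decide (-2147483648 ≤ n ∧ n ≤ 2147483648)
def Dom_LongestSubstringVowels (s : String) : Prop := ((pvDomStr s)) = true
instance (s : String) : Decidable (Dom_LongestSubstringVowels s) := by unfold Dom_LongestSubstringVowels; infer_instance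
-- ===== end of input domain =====

-- B replaces A's two-pointer window with a single run counter resetting at non-vowels (simpler).

-- ===== PORT A =====
-- `c in 'aeiou'`
def pvIsVowel (c : Char) : Bool := c = 'a' || c = 'e' || c = 'i' || c = 'o' || c = 'u'

-- A's while loop; s[prev]/s[forward] ported as getD (exact: the loop keeps 0 ≤ prev ≤ forward < len, so both indexings are in range and never raise)
def pvALoop (cs : List Char) (prev forward longest : Nat) : Nat × Nat × Nat :=
  if forward < cs.length then
    if pvIsVowel (cs.getD prev ' ') && !pvIsVowel (cs.getD forward ' ') then
      pvALoop cs forward (forward + 1)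
        (if forward - prev > longest then forward - prev else longest)
    else if pvIsVowel (cs.getD prev ' ') && pvIsVowel (cs.getD forward ' ') then
      pvALoop cs prev (forward + 1) longest
    else
      pvALoop cs (prev + 1) (forward + 1) longest
  else (prev, forward, longest)
termination_by cs.length - forward

def LongestSubstringVowels (s : String) : Int :=
  match pvALoop s.toList 0 0 0 with
  | (prev, forward, longest) =>
    ((if forward - prev > longest then forward - prev else longest : Nat) : Int)

-- ===== PORT B =====
-- one step of B's for-loop: state = (longest, current)
def pvBStep (acc : Nat × Nat) (ch : Char) : Nat × Nat :=
  if pvIsVowel ch then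
    (if acc.2 + 1 > acc.1 then acc.2 + 1 else acc.1, acc.2 + 1)
  else (acc.1, 0)

def LongestSubstringVowels_alt (s : String) : Int :=
  ((s.toList.foldl pvBStep (0, 0)).1 : Nat)

-- ===== PRECONDITION & SPEC =====
def Spec_LongestSubstringVowels (s : String) (out : Int) : Prop := out = LongestSubstringVowels_alt s
instance (s : String) (out : Int) : Decidable (Spec_LongestSubstringVowels s out) := by unfold Spec_LongestSubstringVowels; infer_instance

-- ===== CLAIM (what is proved, stated in full; the proofs are below) =====
def Claim_equal_LongestSubstringVowels : Prop := ∀ (s : String), Dom_LongestSubstringVowels s → Spec_LongestSubstringVowels s (LongestSubstringVowels s)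

-- ===== LEMMAS ∧ PROOFS =====

-- A's post-loop fixup, applied to the loop's final (prev, forward, longest)
def pvFinish (r : Nat × Nat × Nat) : Nat :=
  if r.2.1 - r.1 > r.2.2 then r.2.1 - r.1 else r.2.2

-- Invariant tying A's window (prev, forward, longest) to B's scan state (L, c) after `forward` chars:
-- either the window [prev, forward) is the current all-vowel run (c = its length, L = max longest c),
-- or the window is the single non-vowel char that just closed a run (c = 0, L = longest ≥ 1).
def pvInv (cs : List Char) (prev forward longest L c : Nat) : Prop :=
  prev ≤ forward ∧ forward ≤ cs.length ∧
  ( ((∀ i, prev ≤ i → i < forward → pvIsVowel (cs.getD i ' ') = true) ∧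
      c = forward - prev ∧ L = max longest c)
  ∨ (forward = prev + 1 ∧ pvIsVowel (cs.getD prev ' ') = false ∧
      c = 0 ∧ L = longest ∧ 1 ≤ longest) )

lemma pvKey (fuel : Nat) : ∀ (cs : List Char) (prev forward longest L c : Nat),
    cs.length - forward ≤ fuel →
    pvInv cs prev forward longest L c →
    pvFinish (pvALoop cs prev forward longest)
      = (List.foldl pvBStep (L, c) (cs.drop forward)).1 := by
  induction fuel with
  | zero =>
    intro cs prev forward longest L c hfuel hinv
    have hge : cs.length ≤ forward := by omega
    have hA : pvALoop cs prev forward longest = (prev, forward, longest) := by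
      rw [pvALoop, if_neg (by omega : ¬ forward < cs.length)]
    rw [hA, List.drop_eq_nil_of_le hge]
    simp only [List.foldl_nil, pvFinish]
    rcases hinv with ⟨hpf, hfl, hSv | hSn⟩
    . rcases hSv with ⟨_, hc, hL⟩
      simp only [Nat.max_def] at hL; split_ifs at hL ⊢ <;> omega
    . rcases hSn with ⟨hf, _, hc, hL, hge1⟩; split <;> omega
  | succ n ih =>
    intro cs prev forward longest L c hfuel hinv
    rcases hinv with ⟨hpf, hfl, hstate⟩
    by_cases hlt : forward < cs.length
    . have hdrop : cs.drop forward = cs.getD forward ' ' :: cs.drop (forward + 1) := by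
        rw [List.getD_eq_getElem cs ' ' hlt]
        exact List.drop_eq_getElem_cons hlt
      rw [hdrop]
      simp only [List.foldl_cons]
      by_cases h1p : pvIsVowel (cs.getD prev ' ') = true
      all_goals simp only [List.getD_eq_getElem?_getD] at h1p
      . by_cases h1f : pvIsVowel (cs.getD forward ' ') = true
        all_goals simp only [List.getD_eq_getElem?_getD] at h1f
        . -- grow the window
          have hA : pvALoop cs prev forward longest
              = pvALoop cs prev (forward + 1) longest := by
            rw [pvALoop, if_pos hlt]; simp [h1p, h1f]
          rw [hA]
          rcases hstate with hSv | hSn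
          . rcases hSv with ⟨hrun, hc, hL⟩
            have hstep : pvBStep (L, c) (cs.getD forward ' ')
                = (if c + 1 > L then c + 1 else L, c + 1) := by
              simp [pvBStep, h1f]
            rw [hstep]
            apply ih cs prev (forward + 1) longest _ _ (by omega)
            refine ⟨by omega, by omega, Or.inl ⟨?_, ?_, ?_⟩⟩
            . intro i hi1 hi2
              by_cases hi : i < forward
              . exact hrun i hi1 hi
              . have : i = forward := by omega
                rw [this]; exact h1f
            . omega
            . simp only [Nat.max_def] at hL ⊢ <;> split_ifs at hL ⊢ <;> omega
          . rcases hSn with ⟨_, hnp, _, _, _⟩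
            simp [h1p] at hnp
        . -- close the window
          have hA : pvALoop cs prev forward longest
              = pvALoop cs forward (forward + 1)
                  (if forward - prev > longest then forward - prev else longest) := by
            rw [pvALoop, if_pos hlt]; simp [h1p, h1f]
          rw [hA]
          rcases hstate with hSv | hSn
          . rcases hSv with ⟨hrun, hc, hL⟩
            have hplt : prev < forward := by
              rcases Nat.lt_or_ge prev forward with h | h
              . exact h
              . exfalso
                have heq : prev = forward := by omega
                rw [heq] at h1p; exact h1f h1p
            have hstep : pvBStep (L, c) (cs.getD forward ' ') = (L, 0) := by
              simp [pvBStep, h1f]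
            rw [hstep]
            apply ih cs forward (forward + 1)
                (if forward - prev > longest then forward - prev else longest) L 0
                (by omega)
            refine ⟨by omega, by omega, Or.inr ⟨rfl, ?_, rfl, ?_, ?_⟩⟩
            . exact Bool.eq_false_iff.mpr h1f
            . simp only [Nat.max_def] at hL; split_ifs at hL ⊢ <;> omega
            . split <;> omega
          . rcases hSn with ⟨_, hnp, _, _, _⟩
            simp [h1p] at hnp
      . -- else branch: s[prev] is not a vowel
        have hA : pvALoop cs prev forward longest
            = pvALoop cs (prev + 1) (forward + 1) longest := by
          rw [pvALoop, if_pos hlt]; simp [h1p]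
        rw [hA]
        rcases hstate with hSv | hSn
        . rcases hSv with ⟨hrun, hc, hL⟩
          have hpe : prev = forward := by
            rcases Nat.lt_or_ge prev forward with h | h
            . exact absurd (hrun prev (le_refl _) h) h1p
            . omega
          have hstep : pvBStep (L, c) (cs.getD forward ' ') = (L, 0) := by
            simp [pvBStep, hpe ▸ h1p]
          rw [hstep]
          apply ih cs (prev + 1) (forward + 1) longest L 0 (by omega)
          refine ⟨by omega, by omega, Or.inl ⟨?_, by omega, ?_⟩⟩
          . intro i hi1 hi2; omega
          . simp only [Nat.max_def] at hL ⊢ <;> split_ifs at hL ⊢ <;> omega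
        . rcases hSn with ⟨hf1, hnp, hc0, hLl, hge1⟩
          by_cases hbf : pvIsVowel (cs.getD forward ' ') = true
          all_goals simp only [List.getD_eq_getElem?_getD] at hbf
          . -- next char vowel: start a new run of length 1
            have hstep : pvBStep (L, c) (cs.getD forward ' ')
                = (if c + 1 > L then c + 1 else L, c + 1) := by
              simp [pvBStep, hbf]
            rw [hstep]
            apply ih cs (prev + 1) (forward + 1) longest _ _ (by omega)
            refine ⟨by omega, by omega, Or.inl ⟨?_, by omega, ?_⟩⟩
            . intro i hi1 hi2
              have : i = forward := by omega
              rw [this]; exact hbf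
            . simp only [Nat.max_def]; split_ifs <;> omega
          . -- next char non-vowel: stay in the closed state
            have hstep : pvBStep (L, c) (cs.getD forward ' ') = (L, 0) := by
              simp [pvBStep, hbf]
            rw [hstep]
            apply ih cs (prev + 1) (forward + 1) longest L 0 (by omega)
            refine ⟨by omega, by omega, Or.inr ⟨by omega, ?_, rfl, hLl, hge1⟩⟩
            have heq : prev + 1 = forward := by omega
            rw [heq]; exact Bool.eq_false_iff.mpr hbf
    . have hA : pvALoop cs prev forward longest = (prev, forward, longest) := by
        rw [pvALoop, if_neg hlt]
      rw [hA, List.drop_eq_nil_of_le (by omega)]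
      simp only [List.foldl_nil, pvFinish]
      rcases hstate with hSv | hSn
      . rcases hSv with ⟨_, hc, hL⟩
        simp only [Nat.max_def] at hL; split_ifs at hL ⊢ <;> omega
      . rcases hSn with ⟨hf, _, hc, hL, hge1⟩; split <;> omega

-- ===== VERDICT (by name: the statement is the Claim_ definition above) =====
theorem LongestSubstringVowels_spec : Claim_equal_LongestSubstringVowels := by
  intro s _
  unfold Spec_LongestSubstringVowels LongestSubstringVowels LongestSubstringVowels_alt
  have h := pvKey s.toList.length s.toList 0 0 0 0 0 (by omega)
      ⟨le_refl _, by omega, Or.inl ⟨by omega, rfl, rfl⟩⟩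
  simp only [List.drop_zero] at h
  rcases hA : pvALoop s.toList 0 0 0 with ⟨p, f, lg⟩
  rw [hA] at h
  simp only [pvFinish] at h
  show (((if f - p > lg then f - p else lg : Nat)) : Int) = _
  rw [h]
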